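-- pv_equiv track=rewrite | github.com/Macavitty/gost28147-89 | gost.py | get_sub_keys
-- ===== SOURCE A (Python) =====
-- KEY_SIZE_BYTES = 32
--
-- def str_as_int(s):
--     if s == '':
--         return 0
--     num = 0
--     for i in range(len(s)):
--         num <<= 8
--         num |= ord(s[i])
--     return num
--
-- def get_sub_keys(key):
--     key_list = []
--     sub_keys = []
--     i = 0
--     while i < KEY_SIZE_BYTES:
--         key_list.append(str_as_int(key[i: i + 4]))
--         sub_keys.insert(0, key_list[len(key_list) - 1])
--         i += 4
--
--     for i in range(0, 24):
--         sub_keys.insert(0, key_list[(23 - i) % len(key_list)])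
--
--     return sub_keys
-- ===== SOURCE B (Python) =====
-- KEY_SIZE_BYTES = 32
--
-- def str_as_int(s):
--     if s == '':
--         return 0
--     num = 0
--     for i in range(len(s)):
--         num <<= 8
--         num |= ord(s[i])
--     return num
--
-- def get_sub_keys(key):
--     key_list = [str_as_int(key[i:i + 4]) for i in range(0, KEY_SIZE_BYTES, 4)]
--     return key_list * 3 + key_list[::-1]
-- ===== Notes on version B (the rewrite author's own statement) =====
-- stated objective: simpler
-- what changed: B decodes the eight 4-byte words with one comprehension and builds the schedule as the closed-form key_list*3 + key_list[::-1], replacing A's while loop with two parallel accumulators and the 24-step insert(0) loop with the modular (23-i)%len index trick.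
import Mathlib
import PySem

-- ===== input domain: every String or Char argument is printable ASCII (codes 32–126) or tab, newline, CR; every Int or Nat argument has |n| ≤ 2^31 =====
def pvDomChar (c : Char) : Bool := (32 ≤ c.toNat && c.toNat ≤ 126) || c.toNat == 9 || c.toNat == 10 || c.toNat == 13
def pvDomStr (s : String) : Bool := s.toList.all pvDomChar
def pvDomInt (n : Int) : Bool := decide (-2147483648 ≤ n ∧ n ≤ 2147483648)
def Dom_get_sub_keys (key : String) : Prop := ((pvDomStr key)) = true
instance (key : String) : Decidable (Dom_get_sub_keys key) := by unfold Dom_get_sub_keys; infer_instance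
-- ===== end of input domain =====

-- B replaces A's two insert(0) loops by one comprehension and the closed form key_list*3 + key_list[::-1] (simpler; return value only, no mutation involved).

-- ===== PORT A =====
-- shared-module helper str_as_int (used verbatim by both Pythons); num is always ≥ 0 and
-- ord(c) < 2^8 before the or, so 'num <<= 8; num |= ord(c)' is exactly num*256 + ord(c).
def str_as_int (s : List Char) : Int :=
  if s = [] then 0
  else s.foldl (fun num c => num * 256 + (c.toNat : Int)) 0

def get_sub_keys (key : String) : List Int :=
  -- while i < 32 step 4: append decoded slice to key_list, insert its last element at front of sub_keys
  let st := (PySem.List.pyRange 0 32 4).foldl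
    (fun (st : List Int × List Int) i =>
      let key_list := st.1 ++ [str_as_int (PySem.List.slice key.toList (some i) (some (i + 4)))]
      (key_list, PySem.List.insert st.2 0 (PySem.List.pyGetD key_list ((key_list.length : Int) - 1) 0)))
    ([], [])
  -- for i in range(0, 24): sub_keys.insert(0, key_list[(23 - i) % len(key_list)])
  (PySem.List.pyRange 0 24 1).foldl
    (fun sub_keys i =>
      PySem.List.insert sub_keys 0 (PySem.List.pyGetD st.1 (PySem.Int.mod (23 - i) (st.1.length : Int)) 0))
    st.2

-- ===== PORT B =====
def get_sub_keys_alt (key : String) : List Int :=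
  let key_list := (PySem.List.pyRange 0 32 4).map
    (fun i => str_as_int (PySem.List.slice key.toList (some i) (some (i + 4))))
  key_list ++ key_list ++ key_list ++ key_list.reverse

-- ===== PRECONDITION & SPEC =====
def Spec_get_sub_keys (key : String) (out : List Int) : Prop := out = get_sub_keys_alt key
instance (key : String) (out : List Int) : Decidable (Spec_get_sub_keys key out) := by unfold Spec_get_sub_keys; infer_instance

-- ===== CLAIM (what is proved, stated in full; the proofs are below) =====
def Claim_equal_get_sub_keys : Prop := ∀ (key : String), Dom_get_sub_keys key → Spec_get_sub_keys key (get_sub_keys key)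

-- ===== LEMMAS AND PROOFS =====

theorem pvRange32 : PySem.List.pyRange 0 32 4 = [0, 4, 8, 12, 16, 20, 24, 28] := by decide

theorem pvRange24 : PySem.List.pyRange 0 24 1 =
    [0, 1, 2, 3, 4, 5, 6, 7, 8, 9, 10, 11, 12, 13, 14, 15, 16, 17, 18, 19, 20, 21, 22, 23] := by
  decide

-- ===== VERDICT (by name: the statement is the Claim_ definition above) =====
theorem get_sub_keys_spec : Claim_equal_get_sub_keys := by
  intro key _
  unfold Spec_get_sub_keys get_sub_keys get_sub_keys_alt
  rw [pvRange32]
  norm_num [List.foldl, List.map, PySem.List.insert_zero, PySem.List.pyGetD, PySem.List.pyIdx?]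
  rw [pvRange24]
  norm_num [List.foldl, List.map, PySem.List.insert_zero, PySem.List.pyGetD, PySem.List.pyIdx?,
    PySem.Int.mod, Int.fmod_eq_emod]
  and_intros <;> rfl
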